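-- pv_equiv track=rewrite | github.com/mgpremierutilidades-sys/plugaishop-app | scripts/bridge/bridge_server.py | _is_denied_path
-- ===== SOURCE A (Python) =====
-- import fnmatch
--
-- DENY_PATTERNS = [
--     ".env", ".env.*", "*.pem", "*.p12", "*.pfx", "*.key", "*id_rsa*", "*id_ed25519*",
--     "secrets.*", "*secret*", "*token*", "*private*key*",
-- ]
--
-- DENY_DIRS = {
--     ".git", "node_modules", "dist", "dist-web", "build", ".expo", ".next", ".turbo",
--     "android", "ios",
-- }
--
-- def _is_denied_path(rel_posix: str) -> bool:
--     rel = rel_posix.replace("\\", "/").lower()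
--     parts = rel.split("/")
--     if any(p in DENY_DIRS for p in parts):
--         return True
--     name = parts[-1]
--     for pat in DENY_PATTERNS:
--         if fnmatch.fnmatch(name, pat.lower()) or fnmatch.fnmatch(rel, pat.lower()):
--             return True
--     return False
-- ===== SOURCE B (Python) =====
-- DENY_DIRS = {
--     ".git", "node_modules", "dist", "dist-web", "build", ".expo", ".next", ".turbo",
--     "android", "ios",
-- }
--
-- def _hit(s: str) -> bool:
--     # direct string tests equivalent to the glob DENY_PATTERNS
--     i = s.find("private")
--     return (
--         s == ".env"
--         or s.startswith(".env.") or s.startswith("secrets.")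
--         or s.endswith(".pem") or s.endswith(".p12") or s.endswith(".pfx") or s.endswith(".key")
--         or "id_rsa" in s or "id_ed25519" in s or "secret" in s or "token" in s
--         or (i != -1 and "key" in s[i + 7:])
--     )
--
-- def _is_denied_path(rel_posix: str) -> bool:
--     rel = rel_posix.replace("\\", "/").lower()
--     parts = rel.split("/")
--     if any(p in DENY_DIRS for p in parts):
--         return True
--     name = parts[-1]
--     return _hit(name) or _hit(rel)
-- ===== Notes on version B (the rewrite author's own statement) =====
-- stated objective: faster
-- what changed: Replaces the per-pattern fnmatch glob loop by direct string tests (equality, startswith, endswith, substring, and a find-based check for *private*key*), keeping the dir-component check.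
import Mathlib
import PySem

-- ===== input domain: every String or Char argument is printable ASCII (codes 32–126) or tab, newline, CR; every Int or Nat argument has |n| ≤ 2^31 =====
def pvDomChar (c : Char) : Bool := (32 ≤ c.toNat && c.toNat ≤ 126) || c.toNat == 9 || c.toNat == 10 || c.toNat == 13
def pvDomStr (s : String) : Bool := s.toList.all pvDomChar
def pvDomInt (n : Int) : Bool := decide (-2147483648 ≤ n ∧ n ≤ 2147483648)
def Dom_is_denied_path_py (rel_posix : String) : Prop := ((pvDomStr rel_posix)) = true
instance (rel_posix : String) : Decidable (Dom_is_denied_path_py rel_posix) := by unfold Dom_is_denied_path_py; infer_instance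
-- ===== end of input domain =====

-- B replaces the per-pattern fnmatch glob loop by direct string tests (equality / startswith /
-- endswith / substring / a find-based check for "*private*key*"); measured faster by a constant factor.


-- ===== PORT A =====
def pvDenyPatterns : List String :=
  [".env", ".env.*", "*.pem", "*.p12", "*.pfx", "*.key", "*id_rsa*", "*id_ed25519*",
   "secrets.*", "*secret*", "*token*", "*private*key*"]

def pvDenyDirs : List (List Char) :=
  [".git".toList, "node_modules".toList, "dist".toList, "dist-web".toList, "build".toList,
   ".expo".toList, ".next".toList, ".turbo".toList, "android".toList, "ios".toList]

-- hand-written port of fnmatch.fnmatch for patterns made of literal characters and '*'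
-- (every DENY_PATTERN is of that shape; os.path.normcase is the identity on POSIX, and both
-- the name and the pattern are already lowercased by the caller, so this is exact here)
def pvGlob (p s : List Char) : Bool :=
  match p, s with
  | [], s => s.isEmpty
  | c :: p', s =>
    if c = '*' then
      pvGlob p' s ||
        (match s with
         | [] => false
         | _ :: s' => pvGlob (c :: p') s')
    else
      match s with
      | [] => false
      | d :: s' => c == d && pvGlob p' s'
termination_by (s.length, p.length)

def is_denied_path_py (rel_posix : String) : Bool :=
  let rel := (PySem.Str.lower (PySem.Str.replace rel_posix "\\" "/")).toList
  let parts := PySem.Chars.splitOn rel "/".toList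
  if parts.any (fun p => pvDenyDirs.contains p) then true
  else
    -- parts[-1]: splitOn never returns [], so the getD default is unreachable
    let name := (PySem.List.pyGet? parts (-1)).getD []
    pvDenyPatterns.any (fun pat =>
      pvGlob (PySem.Chars.lower pat.toList) name || pvGlob (PySem.Chars.lower pat.toList) rel)

-- ===== PORT B =====
def pvHit (s : List Char) : Bool :=
  let i := PySem.Chars.find s "private".toList
  (s == ".env".toList)
  || PySem.Chars.startswith s ".env.".toList
  || PySem.Chars.startswith s "secrets.".toList
  || PySem.Chars.endswith s ".pem".toList
  || PySem.Chars.endswith s ".p12".toList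
  || PySem.Chars.endswith s ".pfx".toList
  || PySem.Chars.endswith s ".key".toList
  || PySem.Chars.isIn "id_rsa".toList s
  || PySem.Chars.isIn "id_ed25519".toList s
  || PySem.Chars.isIn "secret".toList s
  || PySem.Chars.isIn "token".toList s
  || (i != -1 && PySem.Chars.isIn "key".toList (PySem.List.slice s (some (i + 7)) none))

def is_denied_path_py_alt (rel_posix : String) : Bool :=
  let rel := (PySem.Str.lower (PySem.Str.replace rel_posix "\\" "/")).toList
  let parts := PySem.Chars.splitOn rel "/".toList
  if parts.any (fun p => pvDenyDirs.contains p) then true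
  else
    let name := (PySem.List.pyGet? parts (-1)).getD []
    pvHit name || pvHit rel

-- ===== PRECONDITION & SPEC =====
def Spec_is_denied_path_py (rel_posix : String) (out : Bool) : Prop := out = is_denied_path_py_alt rel_posix
instance (rel_posix : String) (out : Bool) : Decidable (Spec_is_denied_path_py rel_posix out) := by unfold Spec_is_denied_path_py; infer_instance

-- ===== CLAIM (what is proved, stated in full; the proofs are below) =====
def Claim_equal_is_denied_path_py : Prop := ∀ (rel_posix : String), Dom_is_denied_path_py rel_posix → Spec_is_denied_path_py rel_posix (is_denied_path_py rel_posix)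

-- ===== LEMMAS AND PROOFS =====

-- unfolding equations for the '*' branch of pvGlob
theorem pvGlob_star_cons (p : List Char) (d : Char) (s' : List Char) :
    pvGlob ('*' :: p) (d :: s') = (pvGlob p (d :: s') || pvGlob ('*' :: p) s') := by
  conv_lhs => rw [pvGlob]
  simp

theorem pvGlob_star_nil' (p : List Char) : pvGlob ('*' :: p) [] = pvGlob p [] := by
  conv_lhs => rw [pvGlob]
  simp

-- a '*'-free pattern segment consumes exactly itself from the front
theorem pvGlob_lit (p : List Char) (hp : '*' ∉ p) (q s : List Char) :
    pvGlob (p ++ q) s = (p.isPrefixOf s && pvGlob q (s.drop p.length)) := by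
  induction p generalizing s with
  | nil => simp
  | cons c p' ih =>
    have hc : c ≠ '*' := fun h => hp (h ▸ List.mem_cons_self ..)
    have hp' : '*' ∉ p' := fun h => hp (List.mem_cons_of_mem _ h)
    cases s with
    | nil => simp [pvGlob, hc, List.isPrefixOf]
    | cons d s' =>
      rw [List.cons_append, pvGlob]
      simp only [hc, if_false, List.isPrefixOf, ih hp' s', List.length_cons, List.drop_succ_cons,
        Bool.and_assoc]

theorem pvGlob_star (p s : List Char) :
    pvGlob ('*' :: p) s = true ↔ ∃ t, t <:+ s ∧ pvGlob p t = true := by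
  induction s with
  | nil =>
    rw [pvGlob_star_nil']
    constructor
    · intro h; exact ⟨[], List.nil_suffix, h⟩
    · rintro ⟨t, ht, hg⟩
      rcases List.suffix_nil.mp ht with rfl
      exact hg
  | cons d s' ih =>
    rw [pvGlob_star_cons, Bool.or_eq_true, ih]
    constructor
    · rintro (h | ⟨t, ht, hg⟩)
      · exact ⟨d :: s', List.suffix_refl _, h⟩
      · exact ⟨t, ht.trans (List.suffix_cons d s'), hg⟩
    · rintro ⟨t, ht, hg⟩
      rcases List.suffix_cons_iff.mp ht with rfl | ht'
      · exact Or.inl hg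
      · exact Or.inr ⟨t, ht', hg⟩

theorem pvGlob_nil (s : List Char) : pvGlob [] s = s.isEmpty := by rw [pvGlob]

theorem pvGlob_star_nil (s : List Char) : pvGlob ['*'] s = true := by
  exact (pvGlob_star [] s).mpr ⟨[], List.nil_suffix, by rw [pvGlob_nil]; rfl⟩

-- pattern = literal: exact equality
theorem pvGlob_eq_beq (p : List Char) (hp : '*' ∉ p) (s : List Char) :
    pvGlob p s = (s == p) := by
  have h := pvGlob_lit p hp [] s
  rw [List.append_nil] at h
  rw [h, Bool.eq_iff_iff]
  simp only [Bool.and_eq_true, List.isPrefixOf_iff_prefix, pvGlob_nil, List.isEmpty_iff,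
    List.drop_eq_nil_iff, beq_iff_eq]
  constructor
  · rintro ⟨hpre, hlen⟩
    have := hpre.length_le
    exact (hpre.eq_of_length (by omega)).symm
  · rintro rfl
    exact ⟨List.prefix_refl _, le_refl _⟩

-- pattern = literal ++ "*": startswith
theorem pvGlob_startswith (p : List Char) (hp : '*' ∉ p) (s : List Char) :
    pvGlob (p ++ ['*']) s = PySem.Chars.startswith s p := by
  rw [pvGlob_lit p hp ['*'] s, pvGlob_star_nil, Bool.and_true, Bool.eq_iff_iff,
    List.isPrefixOf_iff_prefix, PySem.Chars.startswith_iff]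

-- pattern = "*" ++ literal: endswith
theorem pvGlob_endswith (p : List Char) (hp : '*' ∉ p) (s : List Char) :
    pvGlob ('*' :: p) s = PySem.Chars.endswith s p := by
  rw [Bool.eq_iff_iff, pvGlob_star, PySem.Chars.endswith_iff]
  constructor
  · rintro ⟨t, ht, hg⟩
    rw [pvGlob_eq_beq p hp] at hg
    exact (beq_iff_eq.mp hg) ▸ ht
  · intro h
    exact ⟨p, h, by rw [pvGlob_eq_beq p hp]; simp⟩

-- pattern = "*" ++ literal ++ "*": substring
theorem pvGlob_isIn (p : List Char) (hp : '*' ∉ p) (s : List Char) :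
    pvGlob ('*' :: (p ++ ['*'])) s = PySem.Chars.isIn p s := by
  rw [Bool.eq_iff_iff, pvGlob_star, PySem.Chars.isIn_iff_infix, List.infix_iff_prefix_suffix]
  constructor
  · rintro ⟨t, ht, hg⟩
    rw [pvGlob_startswith p hp] at hg
    exact ⟨t, (PySem.Chars.startswith_iff t p).mp hg, ht⟩
  · rintro ⟨t, hpre, hsuf⟩
    exact ⟨t, hsuf, by rw [pvGlob_startswith p hp]; exact (PySem.Chars.startswith_iff t p).mpr hpre⟩

-- suffix-of-drop helper
theorem pvDrop_suffix_drop {α : Type} (s : List α) {a b : Nat} (h : a ≤ b) :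
    s.drop b <:+ s.drop a := by
  have : s.drop b = (s.drop a).drop (b - a) := by
    rw [List.drop_drop]; congr 1; omega
  rw [this]
  exact List.drop_suffix _ _

-- pattern "*private*key*": B's find-based test
theorem pvGlob_private (s : List Char) :
    pvGlob ('*' :: ("private".toList ++ '*' :: ("key".toList ++ ['*']))) s =
      (PySem.Chars.find s "private".toList != -1 &&
       PySem.Chars.isIn "key".toList
         (PySem.List.slice s (some (PySem.Chars.find s "private".toList + 7)) none)) := by
  have hpriv : '*' ∉ "private".toList := by decide
  rw [Bool.eq_iff_iff, pvGlob_star]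
  simp only [Bool.and_eq_true, bne_iff_ne, ne_eq]
  constructor
  · rintro ⟨t, ht, hg⟩
    rw [pvGlob_lit _ hpriv] at hg
    simp only [Bool.and_eq_true, List.isPrefixOf_iff_prefix] at hg
    obtain ⟨hpre, hrest⟩ := hg
    rw [pvGlob_isIn _ (by decide)] at hrest
    obtain ⟨u, hu⟩ := ht
    have hk : t = s.drop u.length := by rw [← hu]; simp
    have hinf : "private".toList <:+: s :=
      List.infix_iff_prefix_suffix.mpr ⟨t, hpre, ⟨u, hu⟩⟩
    have hfind : 0 ≤ PySem.Chars.find s "private".toList :=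
      (PySem.Chars.find_nonneg_iff s _).mpr hinf
    set i := PySem.Chars.find s "private".toList with hi
    have hspec := PySem.Chars.find_spec (s := s) (sub := "private".toList) hfind
    have hmin : i.toNat ≤ u.length := by
      by_contra hlt
      exact (hspec.2 u.length (by omega)) (hk ▸ hpre)
    refine ⟨by omega, ?_⟩
    rw [PySem.List.slice_from s (by omega : (0:Int) ≤ i + 7)]
    have h7 : (i + 7).toNat = i.toNat + 7 := by omega
    rw [h7]
    rw [PySem.Chars.isIn_iff_infix] at hrest ⊢
    have hlen7 : "private".toList.length = 7 := by decide
    have hdrop : t.drop "private".toList.length = s.drop (u.length + 7) := by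
      rw [hk, List.drop_drop, hlen7]
    rw [hdrop] at hrest
    exact hrest.trans (pvDrop_suffix_drop s (by omega)).isInfix
  · rintro ⟨hne, hin⟩
    have hfind : 0 ≤ PySem.Chars.find s "private".toList := by
      have := PySem.Chars.neg_one_le_find s "private".toList
      omega
    set i := PySem.Chars.find s "private".toList with hi
    have hspec := PySem.Chars.find_spec (s := s) (sub := "private".toList) hfind
    refine ⟨s.drop i.toNat, List.drop_suffix _ _, ?_⟩
    rw [pvGlob_lit _ hpriv]
    simp only [Bool.and_eq_true, List.isPrefixOf_iff_prefix]
    refine ⟨hspec.1, ?_⟩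
    rw [pvGlob_isIn _ (by decide)]
    rw [PySem.List.slice_from s (by omega : (0:Int) ≤ i + 7)] at hin
    have h7 : (i + 7).toNat = i.toNat + 7 := by omega
    rw [h7] at hin
    have hlen7 : "private".toList.length = 7 := by decide
    have hdrop : (s.drop i.toNat).drop "private".toList.length = s.drop (i.toNat + 7) := by
      rw [List.drop_drop, hlen7]
    rw [hdrop]
    exact hin

-- the whole pattern loop equals B's direct tests, for one string
theorem pvAny_eq_hit (s : List Char) :
    pvDenyPatterns.any (fun pat => pvGlob (PySem.Chars.lower pat.toList) s) = pvHit s := by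
  have e1 : PySem.Chars.lower ".env".toList = ".env".toList := by decide
  have e2 : PySem.Chars.lower ".env.*".toList = ".env.".toList ++ ['*'] := by decide
  have e3 : PySem.Chars.lower "*.pem".toList = '*' :: ".pem".toList := by decide
  have e4 : PySem.Chars.lower "*.p12".toList = '*' :: ".p12".toList := by decide
  have e5 : PySem.Chars.lower "*.pfx".toList = '*' :: ".pfx".toList := by decide
  have e6 : PySem.Chars.lower "*.key".toList = '*' :: ".key".toList := by decide
  have e7 : PySem.Chars.lower "*id_rsa*".toList = '*' :: ("id_rsa".toList ++ ['*']) := by decide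
  have e8 : PySem.Chars.lower "*id_ed25519*".toList = '*' :: ("id_ed25519".toList ++ ['*']) := by decide
  have e9 : PySem.Chars.lower "secrets.*".toList = "secrets.".toList ++ ['*'] := by decide
  have e10 : PySem.Chars.lower "*secret*".toList = '*' :: ("secret".toList ++ ['*']) := by decide
  have e11 : PySem.Chars.lower "*token*".toList = '*' :: ("token".toList ++ ['*']) := by decide
  have e12 : PySem.Chars.lower "*private*key*".toList =
      '*' :: ("private".toList ++ '*' :: ("key".toList ++ ['*'])) := by decide
  rw [pvHit]
  simp only [pvDenyPatterns, List.any_cons, List.any_nil,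
    e1, e2, e3, e4, e5, e6, e7, e8, e9, e10, e11, e12,
    pvGlob_eq_beq ".env".toList (by decide),
    pvGlob_startswith ".env.".toList (by decide),
    pvGlob_startswith "secrets.".toList (by decide),
    pvGlob_endswith ".pem".toList (by decide),
    pvGlob_endswith ".p12".toList (by decide),
    pvGlob_endswith ".pfx".toList (by decide),
    pvGlob_endswith ".key".toList (by decide),
    pvGlob_isIn "id_rsa".toList (by decide),
    pvGlob_isIn "id_ed25519".toList (by decide),
    pvGlob_isIn "secret".toList (by decide),
    pvGlob_isIn "token".toList (by decide),
    pvGlob_private, Bool.or_false]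
  ac_rfl

theorem pvAny_or (name rel : List Char) :
    pvDenyPatterns.any (fun pat =>
        pvGlob (PySem.Chars.lower pat.toList) name || pvGlob (PySem.Chars.lower pat.toList) rel) =
      (pvHit name || pvHit rel) := by
  rw [← pvAny_eq_hit name, ← pvAny_eq_hit rel]
  simp only [pvDenyPatterns, List.any_cons, List.any_nil, Bool.or_false]
  ac_rfl

-- ===== VERDICT (by name: the statement is the Claim_ definition above) =====
theorem is_denied_path_py_spec : Claim_equal_is_denied_path_py := by
  intro rel_posix _
  unfold Spec_is_denied_path_py is_denied_path_py is_denied_path_py_alt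
  dsimp only
  split
  · rfl
  · exact pvAny_or _ _
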